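-- pv_equiv track=rewrite | github.com/vaveave/advent-of-code | aoc/2023/09/__main__.py | extrapolate_backward_value
-- ===== SOURCE A (Python) =====
-- def extrapolate_backward_value(values):
--     deltas = [values]
--     is_not_0 = True
--     while is_not_0:
--         delta = [b - a for a, b in zip(deltas[-1], deltas[-1][1:])]
--         deltas.append(delta)
--         is_not_0 = any(delta)
--     deltas[-1].append(0)
--     for i in range(len(deltas)-2, -1, -1):
--         deltas[i] = [deltas[i][0] - deltas[i+1][0]] + deltas[i]
--     return deltas[0][0]
-- ===== SOURCE B (Python) =====
-- def extrapolate_backward_value(values):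
--     n = len(values)
--     total = 0
--     c = n          # C(n, 1)
--     sign = 1
--     for j, v in enumerate(values):
--         total += sign * c * v
--         c = c * (n - j - 1) // (j + 2)
--         sign = -sign
--     return total
-- ===== Notes on version B (the rewrite author's own statement) =====
-- stated objective: faster
-- what changed: Replaced the O(n^2) finite-difference table (build rows until all-zero, then back-substitute) by the closed-form Lagrange extrapolation at x=-1: a single pass summing (-1)^j * C(n,j+1) * values[j] with incrementally updated binomial coefficients.
import Mathlib
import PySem

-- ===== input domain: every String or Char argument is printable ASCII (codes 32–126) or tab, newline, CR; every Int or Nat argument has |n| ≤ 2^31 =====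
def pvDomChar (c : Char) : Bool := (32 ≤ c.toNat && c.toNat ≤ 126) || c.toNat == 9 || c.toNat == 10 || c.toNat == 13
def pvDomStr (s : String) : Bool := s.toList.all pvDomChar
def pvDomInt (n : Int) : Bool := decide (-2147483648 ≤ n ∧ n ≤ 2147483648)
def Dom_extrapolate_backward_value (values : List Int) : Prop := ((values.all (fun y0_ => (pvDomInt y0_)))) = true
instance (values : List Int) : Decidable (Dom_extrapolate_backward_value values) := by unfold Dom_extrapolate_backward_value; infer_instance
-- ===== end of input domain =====

-- B replaces A's O(n^2) finite-difference table by a one-pass closed-form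
-- sum (-1)^j * C(n,j+1) * values[j] (Lagrange extrapolation at x = -1).


-- ===== PORT A =====
-- delta = [b - a for a, b in zip(row, row[1:])]
def pvDiffRow : List Int → List Int
  | a :: b :: t => (b - a) :: pvDiffRow (b :: t)
  | _ => []

theorem pvDiffRow_length (xs : List Int) : (pvDiffRow xs).length = xs.length - 1 := by
  induction xs with
  | nil => simp [pvDiffRow]
  | cons a t ih =>
    cases t with
    | nil => simp [pvDiffRow]
    | cons b u => simpa [pvDiffRow] using ih

-- the while loop: append difference rows until one is all-zero (or empty)
def pvRowsA (row : List Int) : List (List Int) :=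
  let delta := pvDiffRow row
  if delta.any (· ≠ 0) then delta :: pvRowsA delta else [delta]
termination_by row.length
decreasing_by
  have h1 := pvDiffRow_length row
  rename_i hany
  have : pvDiffRow row ≠ [] := by
    simp only [List.any_eq_true] at hany
    rcases hany with ⟨x, hx, _⟩
    exact List.ne_nil_of_mem hx
  have : 0 < (pvDiffRow row).length := List.length_pos_iff.mpr this
  omega

-- deltas[-1].append(0); for i in range(len(deltas)-2,-1,-1): deltas[i] = [deltas[i][0]-deltas[i+1][0]] + deltas[i]
-- (Python indexes deltas[i][0]; under Pre_ every non-last row is nonempty, so headD 0 is exact there)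
def pvBackRows : List (List Int) → List (List Int)
  | [] => []
  | [r] => [r ++ [0]]
  | r :: s :: rest =>
      let rs := pvBackRows (s :: rest)
      ((r.headD 0 - (rs.headD []).headD 0) :: r) :: rs

def extrapolate_backward_value (values : List Int) : Int :=
  ((pvBackRows (values :: pvRowsA values)).headD []).headD 0

-- ===== PORT B =====
-- for j, v in enumerate(values): total += sign*c*v; c = c*(n-j-1)//(j+2); sign = -sign
def pvAltLoop (n : Int) : Int → Int → Int → Int → List Int → Int
  | _, _, _, total, [] => total
  | j, c, sign, total, v :: vs =>
      pvAltLoop n (j + 1) (PySem.Int.floordiv (c * (n - j - 1)) (j + 2)) (-sign)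
        (total + sign * c * v) vs

def extrapolate_backward_value_alt (values : List Int) : Int :=
  let n : Int := values.length
  pvAltLoop n 0 n 1 0 values

-- ===== PRECONDITION & SPEC =====
-- Pre_ excludes only the empty list, on which A raises IndexError (deltas[0][0] on an empty row).
def Pre_extrapolate_backward_value (values : List Int) : Prop := values ≠ []
instance (values : List Int) : Decidable (Pre_extrapolate_backward_value values) := by
  unfold Pre_extrapolate_backward_value; infer_instance

def pvWitness_extrapolate_backward_value : List Int := [1, 3, 6, 10]

def Spec_extrapolate_backward_value (values : List Int) (out : Int) : Prop := out = extrapolate_backward_value_alt values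
instance (values : List Int) (out : Int) : Decidable (Spec_extrapolate_backward_value values out) := by unfold Spec_extrapolate_backward_value; infer_instance

-- ===== CLAIM (what is proved, stated in full; the proofs are below) =====
def Claim_equal_extrapolate_backward_value : Prop := ∀ (values : List Int), Dom_extrapolate_backward_value values → Pre_extrapolate_backward_value values → Spec_extrapolate_backward_value values (extrapolate_backward_value values)

-- ===== LEMMAS AND PROOFS =====

-- the common mathematical value: v0 - S(diff v), recursively
def pvSval : List Int → Int
  | [] => 0
  | x :: xs => x - pvSval (pvDiffRow (x :: xs))
termination_by l => l.length
decreasing_by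
  simp [pvDiffRow_length]

theorem pvDiffRow_all_zero (xs : List Int) (h : ∀ x ∈ xs, x = 0) :
    ∀ y ∈ pvDiffRow xs, y = 0 := by
  induction xs with
  | nil => simp [pvDiffRow]
  | cons a t ih =>
    cases t with
    | nil => simp [pvDiffRow]
    | cons b u =>
      intro y hy
      simp only [pvDiffRow, List.mem_cons] at hy
      rcases hy with h1 | h2
      · have ha := h a (by simp); have hb := h b (by simp)
        omega
      · exact ih (fun x hx => h x (List.mem_cons_of_mem _ hx)) y h2

theorem pvSval_zero (xs : List Int) (h : ∀ x ∈ xs, x = 0) : pvSval xs = 0 := by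
  fun_induction pvSval xs with
  | case1 => rfl
  | case2 x t ih =>
    have hx := h x (by simp)
    subst hx
    rw [ih (pvDiffRow_all_zero _ h)]; ring

-- ---- A side: A = pvSval on nonempty lists ----
theorem pvSval_cons (a : Int) (t : List Int) :
    pvSval (a :: t) = a - pvSval (pvDiffRow (a :: t)) := by
  rw [pvSval]

-- the head of pvBackRows applied to (row :: pvRowsA row) is pvSval row
theorem pvBack_head (row : List Int) (h : row ≠ []) :
    ((pvBackRows (row :: pvRowsA row)).headD []).headD 0 = pvSval row := by
  fun_induction pvRowsA row with
  | case1 row delta hany ih =>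
    -- delta has a nonzero element, hence is nonempty
    have hne : delta ≠ [] := by
      simp only [List.any_eq_true] at hany
      rcases hany with ⟨x, hx, _⟩
      exact List.ne_nil_of_mem hx
    have ihv := ih hne
    cases row with
    | nil => simp at h
    | cons a t =>
      rw [pvSval_cons]
      cases hrows : pvRowsA delta with
      | nil => simp [pvBackRows, hrows] at ihv ⊢; omega
      | cons r0 rest => simp [pvBackRows, hrows] at ihv ⊢; omega
  | case2 row delta hany =>
    have hz : ∀ x ∈ delta, x = 0 := by
      simp only [List.any_eq_true] at hany
      push Not at hany
      simpa using hany
    cases row with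
    | nil => simp at h
    | cons a t =>
      rw [pvSval_cons]
      rw [pvSval_zero _ hz]
      cases hd : delta with
      | nil => simp [pvBackRows]
      | cons d0 ds =>
        have : d0 = 0 := hz d0 (by simp [hd])
        simp [pvBackRows, this]

theorem pvA_eq_sval (values : List Int) (h : values ≠ []) :
    extrapolate_backward_value values = pvSval values := by
  unfold extrapolate_backward_value
  exact pvBack_head values h

-- ---- B side: the binomial sum ----
def pvBinSum (n : ℕ) : ℕ → List Int → Int
  | _, [] => 0
  | j, v :: t => (-1 : Int) ^ j * (n.choose (j + 1) : Int) * v + pvBinSum n (j + 1) t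

theorem pvAltLoop_eq_binSum (n : ℕ) (vs : List Int) (j : ℕ) (t : Int)
    (hlen : j + vs.length = n) :
    pvAltLoop (n : Int) (j : Int) ((n.choose (j + 1) : ℕ) : Int) ((-1 : Int) ^ j) t vs
      = t + pvBinSum n j vs := by
  induction vs generalizing j t with
  | nil => simp [pvAltLoop, pvBinSum]
  | cons v rest ih =>
    have hj1 : j + 1 ≤ n := by simp at hlen; omega
    have hsub : (n : Int) - (j : Int) - 1 = ((n - (j + 1) : ℕ) : Int) := by
      push_cast [Nat.cast_sub hj1]; ring
    have hnum : ((n.choose (j + 1) : ℕ) : Int) * ((n : Int) - (j : Int) - 1)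
        = ((n.choose (j + 2) * (j + 2) : ℕ) : Int) := by
      rw [hsub]
      exact_mod_cast (Nat.choose_succ_right_eq n (j + 1)).symm
    have hdiv : PySem.Int.floordiv (((n.choose (j + 1) : ℕ) : Int) * ((n : Int) - (j : Int) - 1)) ((j : Int) + 2)
        = ((n.choose (j + 2) : ℕ) : Int) := by
      rw [hnum, show ((j : Int) + 2) = ((j + 2 : ℕ) : Int) by push_cast; ring,
        PySem.Int.floordiv_natCast, Nat.mul_div_cancel _ (by omega)]
    rw [show pvAltLoop (n : Int) (j : Int) ((n.choose (j + 1) : ℕ) : Int) ((-1 : Int) ^ j) t (v :: rest)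
          = pvAltLoop (n : Int) ((j : Int) + 1)
              (PySem.Int.floordiv (((n.choose (j + 1) : ℕ) : Int) * ((n : Int) - (j : Int) - 1)) ((j : Int) + 2))
              (-((-1 : Int) ^ j)) (t + (-1 : Int) ^ j * ((n.choose (j + 1) : ℕ) : Int) * v) rest from rfl]
    rw [hdiv, show ((j : Int) + 1) = ((j + 1 : ℕ) : Int) by push_cast; ring,
      show -((-1 : Int) ^ j) = (-1 : Int) ^ (j + 1) by ring]
    rw [ih (j + 1) _ (by simp at hlen ⊢; omega)]
    simp [pvBinSum]
    ring

theorem pvBinSum_pascal (xs : List Int) (a : Int) (m j : ℕ) (h : m ≤ xs.length + j) :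
    pvBinSum (m + 1) j (a :: xs) + pvBinSum m j (pvDiffRow (a :: xs))
      = (-1 : Int) ^ j * (m.choose j : Int) * a := by
  induction xs generalizing a j with
  | nil =>
    have hz : m.choose (j + 1) = 0 := Nat.choose_eq_zero_of_lt (by simpa using h)
    simp [pvBinSum, pvDiffRow, Nat.choose_succ_succ, hz]
  | cons b t ih =>
    have hP : ((m + 1).choose (j + 1) : Int) = (m.choose j : Int) + (m.choose (j + 1) : Int) := by
      exact_mod_cast congrArg (Nat.cast (R := Int)) (Nat.choose_succ_succ m j)
    have iht := ih b (j + 1) (by simp at h ⊢; omega)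
    simp only [pvBinSum, pvDiffRow] at iht ⊢
    rw [hP]
    linear_combination iht

theorem pvBinSum_eq_sval (v : List Int) : pvBinSum v.length 0 v = pvSval v := by
  fun_induction pvSval v with
  | case1 => rfl
  | case2 x xs ih =>
    have hG := pvBinSum_pascal xs x xs.length 0 (by omega)
    have hlen : (pvDiffRow (x :: xs)).length = xs.length := by
      simp [pvDiffRow_length]
    rw [hlen] at ih
    simp only [List.length_cons] at *
    rw [← ih]
    simp at hG
    omega

theorem pvB_eq_sval (values : List Int) :
    extrapolate_backward_value_alt values = pvSval values := by
  show pvAltLoop (values.length : Int) 0 (values.length : Int) 1 0 values = pvSval values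
  have h := pvAltLoop_eq_binSum values.length values 0 0 (by simp)
  simp only [Nat.cast_zero, pow_zero, Nat.zero_add, Nat.choose_one_right] at h
  rw [h, zero_add, pvBinSum_eq_sval]

-- ===== VERDICT (by name: the statement is the Claim_ definition above) =====
theorem extrapolate_backward_value_spec : Claim_equal_extrapolate_backward_value := by
  intro values _ hpre
  unfold Spec_extrapolate_backward_value
  rw [pvA_eq_sval values hpre, pvB_eq_sval values]
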